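-- pv_equiv track=rewrite | github.com/phil-32/argument_mining_with_generative_LLMs | dataset/cleaning_selection/load_and_clean_dataset_persuade2.py | findCorrectStartIndex
-- ===== SOURCE A (Python) =====
-- def findCorrectStartIndex(full_text, snippet, start_index_in_df, tolerance):
--     """
--     Finds the correct start index of the snippet in full_text based on the
--     supposed often inaccurate start index given in the dataset
--     """
--     start_index = full_text.find(snippet)
--     # If the difference between the start indices is too large look for a later
--     # occurence in full_text.
--     if abs(start_index - start_index_in_df) > tolerance:
--         num_iterations = 0
--         while abs(start_index_in_df - start_index) > tolerance:
--             old_start_index = start_index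
--             start_index = full_text[start_index + len(snippet):]\
--                 .find(snippet)
--             # Error (snippet was not found in full_text)
--             if start_index == -1:
--                 return (full_text.find(snippet), -1)
--             start_index = start_index + old_start_index + len(snippet)
--             num_iterations += 1
--
--         return (start_index, num_iterations)
--
--     # Real start is within margin of error:
--     else:
--         return (start_index, 0)
-- ===== SOURCE B (Python) =====
-- def findCorrectStartIndex(full_text, snippet, start_index_in_df, tolerance):
--     """
--     Finds the correct start index of the snippet in full_text based on the
--     supposed often inaccurate start index given in the dataset
--     """
--     first = full_text.find(snippet)
--     # Initial match (or absence) already within the margin of error.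
--     if abs(first - start_index_in_df) <= tolerance:
--         return (first, 0)
--     # Snippet is absent altogether.
--     if first == -1:
--         return (-1, -1)
--     # Collect all non-overlapping occurrence positions.
--     positions = [first]
--     p = full_text.find(snippet, first + len(snippet))
--     while p != -1:
--         positions.append(p)
--         p = full_text.find(snippet, p + len(snippet))
--     # Return the first later occurrence within tolerance, counting from 1.
--     for k, pos in enumerate(positions[1:], start=1):
--         if abs(pos - start_index_in_df) <= tolerance:
--             return (pos, k)
--     return (first, -1)
-- ===== Notes on version B (the rewrite author's own statement) =====
-- stated objective: alternative
-- what changed: A's interleaved while-loop that repeatedly slices the text and re-tests the tolerance is replaced by first collecting the complete list of non-overlapping occurrence positions with find(snippet, start) and then scanning that list with enumerate for the first position within tolerance; Pre_ excludes only snippet == '' with |start_index_in_df| > tolerance, where A loops forever and never returns.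
import Mathlib
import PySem

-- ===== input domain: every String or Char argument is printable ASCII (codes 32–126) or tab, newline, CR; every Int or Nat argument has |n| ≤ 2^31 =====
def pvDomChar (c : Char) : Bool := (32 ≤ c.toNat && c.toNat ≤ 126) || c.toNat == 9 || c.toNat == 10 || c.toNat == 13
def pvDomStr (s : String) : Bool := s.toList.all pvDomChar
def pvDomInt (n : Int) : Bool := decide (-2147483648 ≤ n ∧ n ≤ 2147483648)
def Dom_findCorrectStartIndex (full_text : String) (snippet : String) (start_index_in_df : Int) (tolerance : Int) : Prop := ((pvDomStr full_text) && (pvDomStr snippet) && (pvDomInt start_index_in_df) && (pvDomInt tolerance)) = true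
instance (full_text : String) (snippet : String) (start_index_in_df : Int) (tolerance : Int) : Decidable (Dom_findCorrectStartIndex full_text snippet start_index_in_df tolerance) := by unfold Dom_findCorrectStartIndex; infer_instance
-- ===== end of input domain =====

-- B replaces A's interleaved slice-and-search while-loop by first collecting the list of
-- non-overlapping occurrence positions and then scanning it with enumerate (objective: alternative).

-- ===== PORT A =====
-- A's while-loop as fuel recursion; fuel full_text.length + 2 covers every terminating run
-- (inside Pre_ the loop advances by ≥ 1 each step and stays ≤ full_text.length).
def pvALoop (ft sn : List Char) (sid tol : Int) : Nat → Int → Int → Int × Int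
  | 0, _, _ => (PySem.Chars.find ft sn, -1)   -- fuel exhausted: unreachable under Pre_
  | fuel+1, start, num =>
    if |sid - start| > tol then
      let rel := PySem.Chars.find (PySem.List.slice ft (some (start + (sn.length : Int))) none) sn
      if rel = -1 then (PySem.Chars.find ft sn, -1)
      else pvALoop ft sn sid tol fuel (rel + start + (sn.length : Int)) (num + 1)
    else (start, num)

def findCorrectStartIndex (full_text : String) (snippet : String) (start_index_in_df : Int) (tolerance : Int) : Int × Int :=
  let ft := full_text.toList
  let sn := snippet.toList
  let start_index := PySem.Chars.find ft sn
  if |start_index - start_index_in_df| > tolerance then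
    pvALoop ft sn start_index_in_df tolerance (ft.length + 2) start_index 0
  else (start_index, 0)

-- ===== PORT B =====
-- Source B's while-loop collecting the non-overlapping occurrence chain (fuel ft.length + 1 covers
-- every terminating run; fuel exhaustion is unreachable under Pre_).
def pvOccs (ft sn : List Char) : Nat → Int → List Int
  | 0, _ => []
  | fuel+1, p =>
    if p = -1 then []
    else p :: pvOccs ft sn fuel (PySem.Chars.findFrom ft sn (p + (sn.length : Int)) none)

-- Source B's for-loop over enumerate(positions[1:], 1)
def pvScan (sid tol first : Int) : List (Int × Int) → Int × Int
  | [] => (first, -1)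
  | (k, pos) :: rest => if |pos - sid| ≤ tol then (pos, k) else pvScan sid tol first rest

def findCorrectStartIndex_alt (full_text : String) (snippet : String) (start_index_in_df : Int) (tolerance : Int) : Int × Int :=
  let ft := full_text.toList
  let sn := snippet.toList
  let first := PySem.Chars.find ft sn
  if |first - start_index_in_df| ≤ tolerance then (first, 0)
  else if first = -1 then (-1, -1)
  else
    let positions := first :: pvOccs ft sn (ft.length + 1)
        (PySem.Chars.findFrom ft sn (first + (sn.length : Int)) none)
    pvScan start_index_in_df tolerance first
      (PySem.List.enumerate (PySem.List.slice positions (some 1) none) 1)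

-- ===== PRECONDITION & SPEC =====
-- Pre_ excludes exactly the inputs with snippet = "" and |start_index_in_df| > tolerance:
-- there Python A (and B) loops forever and never returns a value.
def Pre_findCorrectStartIndex (full_text : String) (snippet : String) (start_index_in_df : Int) (tolerance : Int) : Prop :=
  snippet ≠ "" ∨ |start_index_in_df| ≤ tolerance
instance (full_text : String) (snippet : String) (start_index_in_df : Int) (tolerance : Int) : Decidable (Pre_findCorrectStartIndex full_text snippet start_index_in_df tolerance) := by unfold Pre_findCorrectStartIndex; infer_instance

def pvWitness_findCorrectStartIndex : String × String × Int × Int := ("abab", "ab", 2, 0)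

def Spec_findCorrectStartIndex (full_text : String) (snippet : String) (start_index_in_df : Int) (tolerance : Int) (out : Int × Int) : Prop := out = findCorrectStartIndex_alt full_text snippet start_index_in_df tolerance
instance (full_text : String) (snippet : String) (start_index_in_df : Int) (tolerance : Int) (out : Int × Int) : Decidable (Spec_findCorrectStartIndex full_text snippet start_index_in_df tolerance out) := by unfold Spec_findCorrectStartIndex; infer_instance

-- ===== CLAIM (what is proved, stated in full; the proofs are below) =====
def Claim_equal_findCorrectStartIndex : Prop := ∀ (full_text : String) (snippet : String) (start_index_in_df : Int) (tolerance : Int), Dom_findCorrectStartIndex full_text snippet start_index_in_df tolerance → Pre_findCorrectStartIndex full_text snippet start_index_in_df tolerance → Spec_findCorrectStartIndex full_text snippet start_index_in_df tolerance (findCorrectStartIndex full_text snippet start_index_in_df tolerance)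

-- ===== LEMMAS AND PROOFS =====

-- a successful find leaves room for the whole snippet
lemma pv_find_add_len_le (xs sn : List Char) (h : 0 ≤ PySem.Chars.find xs sn) :
    PySem.Chars.find xs sn + (sn.length : Int) ≤ (xs.length : Int) := by
  have hs := (PySem.Chars.find_spec h).1
  have hlen := hs.length_le
  have h2 := PySem.Chars.find_le_length xs sn
  simp only [List.length_drop] at hlen
  omega

-- an absent snippet is absent from every suffix
lemma pv_find_drop_neg (ft sn : List Char) (h : PySem.Chars.find ft sn = -1) (k : Nat) :
    PySem.Chars.find (ft.drop k) sn = -1 := by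
  rw [PySem.Chars.find_eq_neg_one_iff] at h ⊢
  exact fun hinf => h (hinf.trans (ft.drop_suffix k).isInfix)

-- main loop correspondence: A's interleaved loop equals B's scan of the occurrence chain
lemma pv_loop_eq (ft sn : List Char) (sid tol : Int) (hsn : 1 ≤ sn.length) :
    ∀ (fuel : Nat) (p num : Int), 0 ≤ p → p + (sn.length : Int) ≤ (ft.length : Int) →
    pvALoop ft sn sid tol (fuel + 1) p num =
      if |sid - p| > tol then
        pvScan sid tol (PySem.Chars.find ft sn)
          (PySem.List.enumerate
            (pvOccs ft sn fuel (PySem.Chars.findFrom ft sn (p + (sn.length : Int)) none)) (num + 1))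
      else (p, num) := by
  intro fuel
  induction fuel with
  | zero =>
    intro p num hp hpl
    have h0 : (0:Int) ≤ p + (sn.length : Int) := by omega
    simp only [pvALoop, pvOccs, PySem.List.slice_from ft h0]
    split_ifs <;> simp [pvScan, PySem.List.enumerate_nil]
  | succ fuel ih =>
    intro p num hp hpl
    have h0 : (0:Int) ≤ p + (sn.length : Int) := by omega
    have hk : (p + (sn.length : Int)).toNat ≤ ft.length := by omega
    have hcast : ((p + (sn.length : Int)).toNat : Int) = p + (sn.length : Int) := by omega
    have hff := PySem.Chars.findFrom_natCast ft sn (p + (sn.length : Int)).toNat hk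
    rw [hcast] at hff
    by_cases hc : |sid - p| > tol
    · by_cases hr : PySem.Chars.find (List.drop (p + (sn.length : Int)).toNat ft) sn = -1
      · conv_lhs => rw [pvALoop]
        simp only [PySem.List.slice_from ft h0, if_pos hc, hr, reduceIte]
        rw [hff, if_pos hr]
        simp [pvOccs, pvScan, PySem.List.enumerate_nil]
      · have hrge : 0 ≤ PySem.Chars.find (List.drop (p + (sn.length : Int)).toNat ft) sn := by
          have := PySem.Chars.neg_one_le_find (List.drop (p + (sn.length : Int)).toNat ft) sn
          omega
        have hbound := pv_find_add_len_le (List.drop (p + (sn.length : Int)).toNat ft) sn hrge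
        rw [List.length_drop] at hbound
        set rel := PySem.Chars.find (List.drop (p + (sn.length : Int)).toNat ft) sn with hrel
        have hnew0 : 0 ≤ rel + p + (sn.length : Int) := by omega
        have hnewl : rel + p + (sn.length : Int) + (sn.length : Int) ≤ (ft.length : Int) := by
          have : ((ft.length - (p + (sn.length : Int)).toNat : Nat) : Int)
              = (ft.length : Int) - (p + (sn.length : Int)) := by omega
          omega
        conv_lhs => rw [pvALoop]
        simp only [PySem.List.slice_from ft h0, ← hrel, if_pos hc, if_neg hr]
        rw [ih (rel + p + (sn.length : Int)) (num + 1) hnew0 hnewl]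
        rw [hff, if_neg hr]
        have hcomm : p + (sn.length : Int) + rel = rel + p + (sn.length : Int) := by ring
        rw [hcomm]
        have hne : rel + p + (sn.length : Int) ≠ -1 := by omega
        simp only [pvOccs, if_neg hne, PySem.List.enumerate_cons, pvScan]
        have habs : |sid - (rel + p + (sn.length : Int))| = |rel + p + (sn.length : Int) - sid| :=
          abs_sub_comm _ _
        by_cases ht : |rel + p + (sn.length : Int) - sid| ≤ tol
        · rw [if_neg (by omega), if_pos ht]
        · rw [if_pos (by omega), if_neg ht]
    · simp only [pvALoop, if_neg hc]

theorem findCorrectStartIndex_spec : Claim_equal_findCorrectStartIndex := by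
  intro full_text snippet sid tol _ hpre
  unfold Spec_findCorrectStartIndex
  simp only [findCorrectStartIndex, findCorrectStartIndex_alt]
  set ft := full_text.toList with hft
  set sn := snippet.toList with hsnl
  set p0 := PySem.Chars.find ft sn with hp0
  by_cases hc : |p0 - sid| ≤ tol
  · rw [if_neg (by omega), if_pos hc]
  · rw [if_pos (by omega), if_neg hc]
    have hp0ge : -1 ≤ p0 := PySem.Chars.neg_one_le_find ft sn
    by_cases habs : p0 = -1
    · -- snippet absent: A's loop does one futile step and returns (-1, -1)
      have hL : 1 ≤ sn.length := by
        rcases sn with _ | _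
        · rw [hp0, PySem.Chars.find_nil] at habs; omega
        · simp
      rw [if_pos habs]
      show pvALoop ft sn sid tol (ft.length + 1 + 1) p0 0 = _
      conv_lhs => rw [pvALoop]
      rw [if_pos (by rw [abs_sub_comm sid p0]; omega)]
      have h0 : (0:Int) ≤ p0 + (sn.length : Int) := by omega
      rw [PySem.List.slice_from ft h0,
        pv_find_drop_neg ft sn (by rw [← hp0]; exact habs) _, if_pos rfl, ← hp0, habs]
    · -- snippet present: align A's loop with B's chain scan
      have hp00 : 0 ≤ p0 := by omega
      have hsn : sn ≠ [] := by
        rcases hpre with h' | h'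
        · rw [hsnl]; simp [h']
        · intro h; rw [h, PySem.Chars.find_nil] at hp0
          rw [hp0] at hc; simp at hc; omega
      have hL : 1 ≤ sn.length := by
        rcases sn with _ | _
        · exact absurd rfl hsn
        · simp
      have hpl : p0 + (sn.length : Int) ≤ (ft.length : Int) := pv_find_add_len_le ft sn hp00
      rw [if_neg habs]
      show pvALoop ft sn sid tol (ft.length + 1 + 1) p0 0 = _
      rw [pv_loop_eq ft sn sid tol hL (ft.length + 1) p0 0 hp00 hpl]
      rw [if_pos (by rw [abs_sub_comm sid p0]; omega)]
      rw [PySem.List.slice_from_one]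
      simp only [List.tail_cons]
      rw [← hp0]
      norm_num
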